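-- pv_equiv track=rewrite | github.com/itsachen/CS4740-Project-1 | frequencyTable.py | create_unigram_frequency_table
-- ===== SOURCE A (Python) =====
-- def create_unigram_frequency_table(parsed_list, unk):
--     frequencyTable = {}
--     wordSet = set()
--     for token_list in parsed_list:
--         for token in token_list:
--             if unk and token not in wordSet:
--                 wordSet.add(token)
--                 token = 'UNK'
--             if token in frequencyTable:
--                 frequencyTable[token] += 1
--             else:
--                 frequencyTable[token] = 1
--     return frequencyTable
-- ===== SOURCE B (Python) =====
-- def create_unigram_frequency_table(parsed_list, unk):
--     tokens = [t for tl in parsed_list for t in tl]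
--     if unk:
--         # precompute each token's first-occurrence index, then map first
--         # occurrences to 'UNK' before counting
--         first_index = {}
--         for i, t in enumerate(tokens):
--             if t not in first_index:
--                 first_index[t] = i
--         tokens = ['UNK' if first_index[t] == i else t
--                   for i, t in enumerate(tokens)]
--     table = {}
--     for t in tokens:
--         table[t] = table.get(t, 0) + 1
--     return table
-- ===== Notes on version B (the rewrite author's own statement) =====
-- stated objective: alternative
-- what changed: B replaces A's single fused pass (maintaining a seen-set and mutating the token inline) by a pipeline: flatten all tokens, precompute each token's first-occurrence index, map first occurrences to 'UNK', then count the mapped stream with one dict accumulation.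
import Mathlib
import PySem

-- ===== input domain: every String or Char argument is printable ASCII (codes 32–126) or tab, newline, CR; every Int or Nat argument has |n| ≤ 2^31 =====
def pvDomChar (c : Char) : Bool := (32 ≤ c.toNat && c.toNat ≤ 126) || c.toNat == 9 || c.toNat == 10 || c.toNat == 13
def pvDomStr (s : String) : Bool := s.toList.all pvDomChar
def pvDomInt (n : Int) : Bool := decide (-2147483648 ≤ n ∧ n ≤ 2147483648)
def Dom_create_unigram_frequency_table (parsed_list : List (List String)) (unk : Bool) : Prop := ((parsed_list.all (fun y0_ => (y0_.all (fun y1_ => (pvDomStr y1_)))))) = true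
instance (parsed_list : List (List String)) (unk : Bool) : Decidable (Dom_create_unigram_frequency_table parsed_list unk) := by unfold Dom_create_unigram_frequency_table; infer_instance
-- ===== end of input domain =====

-- B replaces A's fused seen-set pass by a flatten / mark-first-occurrences / count pipeline (alternative decomposition, same cost).

-- ===== PORT A =====
-- A's inner loop body: one token updates (frequencyTable, wordSet)
def pvAStep (unk : Bool) (st : PySem.Dict String Int × PySem.Set String) (token : String) :
    PySem.Dict String Int × PySem.Set String :=
  let (ws, tok) : PySem.Set String × String :=
    if unk && !(PySem.Set.contains st.2 token) then (PySem.Set.add st.2 token, "UNK")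
    else (st.2, token)
  match PySem.Dict.get? st.1 tok with
  | some v => (PySem.Dict.insert st.1 tok (v + 1), ws)
  | none   => (PySem.Dict.insert st.1 tok 1, ws)

def create_unigram_frequency_table (parsed_list : List (List String)) (unk : Bool) : List (String × Int) :=
  (parsed_list.foldl
    (fun st token_list => token_list.foldl (pvAStep unk) st)
    (PySem.Dict.empty, PySem.Set.empty)).1.items

-- ===== PORT B =====
-- first_index accumulation: 'if t not in first_index: first_index[t] = i'
def pvFiStep (d : PySem.Dict String Int) (p : Int × String) : PySem.Dict String Int :=
  if PySem.Dict.contains d p.2 then d else PySem.Dict.insert d p.2 p.1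

-- counting loop: 'table[t] = table.get(t, 0) + 1'
def pvCount (d : PySem.Dict String Int) (t : String) : PySem.Dict String Int :=
  PySem.Dict.insert d t (PySem.Dict.getD d t 0 + 1)

def create_unigram_frequency_table_alt (parsed_list : List (List String)) (unk : Bool) : List (String × Int) :=
  let tokens := parsed_list.flatMap (fun tl => tl)
  let tokens :=
    if unk then
      let fi := (PySem.List.enumerate tokens 0).foldl pvFiStep PySem.Dict.empty
      -- 'first_index[t]' is exact as getD with default -1: every t in tokens is a key of fi
      (PySem.List.enumerate tokens 0).map
        (fun p => if PySem.Dict.getD fi p.2 (-1) = p.1 then "UNK" else p.2)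
    else tokens
  (tokens.foldl pvCount PySem.Dict.empty).items

-- ===== PRECONDITION & SPEC =====
def Spec_create_unigram_frequency_table (parsed_list : List (List String)) (unk : Bool) (out : List (String × Int)) : Prop := out = create_unigram_frequency_table_alt parsed_list unk
instance (parsed_list : List (List String)) (unk : Bool) (out : List (String × Int)) : Decidable (Spec_create_unigram_frequency_table parsed_list unk out) := by unfold Spec_create_unigram_frequency_table; infer_instance

-- ===== CLAIM (what is proved, stated in full; the proofs are below) =====
def Claim_equal_create_unigram_frequency_table : Prop := ∀ (parsed_list : List (List String)) (unk : Bool), Dom_create_unigram_frequency_table parsed_list unk → Spec_create_unigram_frequency_table parsed_list unk (create_unigram_frequency_table parsed_list unk)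

-- ===== LEMMAS AND PROOFS =====

-- A's per-token dict update with unk=false is B's counting update
theorem pvAStep_fst_false (st : PySem.Dict String Int × PySem.Set String) (t : String) :
    pvAStep false st t = (pvCount st.1 t, st.2) := by
  rcases h : PySem.Dict.get? st.1 t with _ | v <;>
    simp [pvAStep, pvCount, h, PySem.Dict.getD_eq_get?_getD]

-- the reference mapping of B: replace each first occurrence (relative to seen prefix s) by "UNK"
def pvMapStream (s : PySem.Set String) : List String → List String
  | [] => []
  | t :: ts =>
      (if PySem.Set.contains s t then t else "UNK") :: pvMapStream (PySem.Set.add s t) ts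

-- A's fold over the flattened tokens = nested fold
theorem pvA_flatten (parsed_list : List (List String)) (unk : Bool)
    (st : PySem.Dict String Int × PySem.Set String) :
    parsed_list.foldl (fun st token_list => token_list.foldl (pvAStep unk) st) st
      = (parsed_list.flatMap (fun tl => tl)).foldl (pvAStep unk) st := by
  induction parsed_list generalizing st with
  | nil => rfl
  | cons tl rest ih => simp [List.foldl_append, ih]

-- unk = false: the set component is dead state
theorem pvA_false (l : List String) (d : PySem.Dict String Int) (s : PySem.Set String) :
    (l.foldl (pvAStep false) (d, s)).1 = l.foldl pvCount d := by
  induction l generalizing d s with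
  | nil => rfl
  | cons t ts ih => rw [List.foldl_cons, pvAStep_fst_false]; exact ih _ _

-- unk = true: A's fused pass counts exactly the pvMapStream-mapped stream
theorem pvA_true (l : List String) (d : PySem.Dict String Int) (s : PySem.Set String) :
    (l.foldl (pvAStep true) (d, s)).1 = (pvMapStream s l).foldl pvCount d := by
  induction l generalizing d s with
  | nil => rfl
  | cons t ts ih =>
      rw [List.foldl_cons, pvMapStream, List.foldl_cons]
      by_cases h : PySem.Set.contains s t
      · have hm : t ∈ s := (PySem.Set.contains_iff s t).mp h
        have hst : pvAStep true (d, s) t = (pvCount d t, s) := by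
          rcases hg : PySem.Dict.get? d t with _ | v <;>
            simp [pvAStep, pvCount, hm, hg, PySem.Dict.getD_eq_get?_getD]
        rw [hst, if_pos h, PySem.Set.add_of_mem hm]
        exact ih _ _
      · have hm : t ∉ s := fun hm => h ((PySem.Set.contains_iff s t).mpr hm)
        have hst : pvAStep true (d, s) t = (pvCount d "UNK", PySem.Set.add s t) := by
          rcases hg : PySem.Dict.get? d "UNK" with _ | v <;>
            simp [pvAStep, pvCount, hm, hg, PySem.Dict.getD_eq_get?_getD]
        rw [hst, if_neg h]
        exact ih _ _

-- characterisation of the first_index fold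
theorem pvFi_get (l : List String) (j : Int) (d : PySem.Dict String Int) (t : String) :
    (((PySem.List.enumerate l j).foldl pvFiStep d).get? t)
      = if PySem.Dict.contains d t then PySem.Dict.get? d t
        else (PySem.List.index? l t).map (fun k => j + k) := by
  induction l generalizing j d with
  | nil =>
      rw [PySem.List.enumerate_nil]
      simp only [List.foldl_nil]
      by_cases hd : PySem.Dict.contains d t
      · rw [if_pos hd]
      · rw [if_neg hd]
        simp [PySem.Dict.get?_eq_none_iff_contains, hd, PySem.List.index?]
  | cons x xs ih =>
      rw [PySem.List.enumerate_cons, List.foldl_cons]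
      by_cases hx : x = t
      · subst hx
        rw [PySem.List.index?_cons_self]
        by_cases hd : PySem.Dict.contains d x
        · rw [show pvFiStep d (j, x) = d from by simp [pvFiStep, hd], ih, if_pos hd, if_pos hd]
        · rw [show pvFiStep d (j, x) = PySem.Dict.insert d x j from by simp [pvFiStep, hd], ih,
            if_pos (PySem.Dict.contains_insert_self d x j), PySem.Dict.get?_insert_self,
            if_neg hd]
          simp
      · rw [PySem.List.index?_cons_of_ne xs hx]
        by_cases hd : PySem.Dict.contains d x
        · rw [show pvFiStep d (j, x) = d from by simp [pvFiStep, hd], ih]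
          by_cases hdt : PySem.Dict.contains d t
          · rw [if_pos hdt, if_pos hdt]
          · rw [if_neg hdt, if_neg hdt]
            cases PySem.List.index? xs t <;> simp <;> omega
        · rw [show pvFiStep d (j, x) = PySem.Dict.insert d x j from by simp [pvFiStep, hd], ih]
          have hc : (PySem.Dict.insert d x j).contains t = PySem.Dict.contains d t := by
            rw [PySem.Dict.contains_insert]
            have : (t == x) = false := by simp [Ne.symm hx]
            simp [this]
          rw [hc]
          by_cases hdt : PySem.Dict.contains d t
          · rw [if_pos hdt, if_pos hdt, PySem.Dict.get?_insert_of_ne _ _ (Ne.symm hx)]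
          · rw [if_neg hdt, if_neg hdt]
            cases PySem.List.index? xs t <;> simp <;> omega

-- B's first-index mapping over a suffix = pvMapStream over the seen-prefix set
theorem pvMap_eq (tokens : List String) (l pre : List String) (s : PySem.Set String)
    (htok : tokens = pre ++ l)
    (hs : ∀ t, PySem.Set.contains s t = true ↔ t ∈ pre) :
    ((PySem.List.enumerate l (pre.length : Int)).map
      (fun p => if PySem.Dict.getD
          ((PySem.List.enumerate tokens 0).foldl pvFiStep PySem.Dict.empty) p.2 (-1) = p.1
        then "UNK" else p.2))
      = pvMapStream s l := by
  induction l generalizing pre s with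
  | nil => simp [PySem.List.enumerate_nil, pvMapStream]
  | cons t ts ih =>
      rw [PySem.List.enumerate_cons, List.map_cons, pvMapStream]
      have hgetD : PySem.Dict.getD
          ((PySem.List.enumerate tokens 0).foldl pvFiStep PySem.Dict.empty) t (-1)
          = ((PySem.List.index? tokens t).map (fun k => ((k : Nat) : Int))).getD (-1) := by
        rw [PySem.Dict.getD_eq_get?_getD, pvFi_get, if_neg (by simp [PySem.Dict.contains_empty])]
        cases PySem.List.index? tokens t <;> simp
      by_cases hmem : t ∈ pre
      · -- t seen before: its first index lies inside pre, strictly below pre.length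
        have h1 : PySem.List.index? tokens t = PySem.List.index? pre t := by
          rw [htok]; exact PySem.List.index?_append_of_mem _ hmem
        have h2 : ∃ k, PySem.List.index? pre t = some k ∧ k < pre.length := by
          rcases hk : PySem.List.index? pre t with _ | k
          · exact absurd ((PySem.List.index?_eq_none_iff pre t).mp hk) (by simp [hmem])
          · rcases (PySem.List.index?_eq_some_iff pre t k).mp hk with ⟨p1, p2, hp, hlen, _⟩
            exact ⟨k, rfl, by subst hp; simp [← hlen]⟩
        rcases h2 with ⟨k, hk, hklt⟩
        have hne : ¬ (PySem.Dict.getD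
            ((PySem.List.enumerate tokens 0).foldl pvFiStep PySem.Dict.empty) t (-1)
            = ((pre.length : Nat) : Int)) := by
          rw [hgetD, h1, hk]; simp; omega
        rw [if_neg hne, if_pos ((hs t).mpr hmem),
          PySem.Set.add_of_mem ((PySem.Set.contains_iff s t).mp ((hs t).mpr hmem))]
        have hrec := ih (pre ++ [t]) s (by simp [htok])
          (fun u => by
            rw [hs u]
            constructor
            · intro h; exact List.mem_append.mpr (Or.inl h)
            · intro h
              rcases List.mem_append.mp h with h | h
              · exact h
              · simp at h; subst h; exact hmem)
        have hlen : (((pre ++ [t]).length : Nat) : Int) = (pre.length : Int) + 1 := by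
          simp
        rw [hlen] at hrec
        rw [← hrec]
      · -- first occurrence: index equals pre.length, token becomes "UNK"
        have h1 : PySem.List.index? tokens t = some pre.length := by
          rw [htok]
          exact (PySem.List.index?_eq_some_iff _ t _).mpr ⟨pre, ts, rfl, rfl, hmem⟩
        have heq : PySem.Dict.getD
            ((PySem.List.enumerate tokens 0).foldl pvFiStep PySem.Dict.empty) t (-1)
            = ((pre.length : Nat) : Int) := by rw [hgetD, h1]; simp
        rw [if_pos heq, if_neg (fun h => hmem ((hs t).mp h))]
        have hrec := ih (pre ++ [t]) (PySem.Set.add s t) (by simp [htok])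
          (fun u => by
            rw [PySem.Set.contains_iff, PySem.Set.mem_add, ← PySem.Set.contains_iff, hs u]
            simp)
        have hlen : (((pre ++ [t]).length : Nat) : Int) = (pre.length : Int) + 1 := by
          simp
        rw [hlen] at hrec
        rw [← hrec]

-- ===== VERDICT (by name: the statement is the Claim_ definition above) =====
theorem create_unigram_frequency_table_spec : Claim_equal_create_unigram_frequency_table := by
  intro parsed_list unk _
  unfold Spec_create_unigram_frequency_table create_unigram_frequency_table
    create_unigram_frequency_table_alt
  rw [pvA_flatten]
  cases unk with
  | false =>
      simp only [Bool.false_eq_true, if_false]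
      rw [pvA_false]
  | true =>
      rw [pvA_true]
      have hrec := pvMap_eq (parsed_list.flatMap (fun tl => tl))
        (parsed_list.flatMap (fun tl => tl)) [] PySem.Set.empty rfl
        (fun t => by simp [PySem.Set.empty, PySem.Set.contains_eq_listContains])
      have h0 : ((([] : List String).length : Nat) : Int) = 0 := by simp
      rw [h0] at hrec
      exact congrArg (fun l => (List.foldl pvCount PySem.Dict.empty l).items) hrec.symm
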